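/- GENERATED by tools/from_farm_form.py from prooffarm-gif/accepted/GifAddExtensionBlock.2/Proof.lean (a worked proof of the farm's unit `GifAddExtensionBlock.2`,
   accepted by the verdict) — do not edit. -/
import Gif.Spec.Units.GifAddExtensionBlock_2
import Gif.Spec.Proved.GifAddExtensionBlock_2_Lemmas

open X86 X86.User Asan ProgX.Base ProgX.Base.Spec Gif.Spec

/-- Segment 2 of `GifAddExtensionBlock` (107BA6H … 107C05H, 107C48H; gifalloc.c l.247-255): from `AfterArray` (the array has room)
to `Done` (`*blocks == NULL`: the first `malloc` of segment 1 failed: GIF_ERROR, nothing changed) or to `AfterBytes` (the new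
block is counted, its `Bytes` is the result of `malloc(Len)`, NULL included). The case split is on the GHOST forest — no pending
list / the pending list `x` — before the walk: the code's test `*blocks == NULL` decides the same (`GifOK.pend_null_iff`), so each
walk has one live arm. The second case is cut at the return of `malloc` (`gab2_Mid`). -/
theorem Gif.Spec.Proved.GifAddExtensionBlock_2_ok : Gif.Spec.GifAddExtensionBlock_2.Statement := by
  intro Lay hLay μ hμ u₀ hcode h_malloc h_load8 h_load4 h_store4 h_store8 H rest frames F R len Hc Fc e ret v hat
  cases hpend : Fc.pend with
  | none =>
    -- 107BA6H → 107C4DH: GIF_ERROR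
    refine ReachVia.mono (Gif.Spec.GifAddExtensionBlock_2.gab2_null Lay hLay μ hμ u₀ hcode h_load8 H rest frames F R len Hc Fc
      e ret v hat hpend) ?_
    intro w hw
    exact Or.inr hw
  | some x =>
    -- 107BA6H → 107BF5H (ret9): the count, two fields of the new block, `malloc(Len)`
    refine (Gif.Spec.GifAddExtensionBlock_2.gab2_to_malloc Lay hLay μ hμ u₀ hcode h_malloc h_load8 h_load4 h_store4 H rest frames
      F R len Hc Fc e ret v hat x hpend).trans ?_
    intro w hw
    obtain ⟨Hm, hmid⟩ := hw
    -- 107BF5H → 107C05H: the store of `ep->Bytes`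
    refine ReachVia.mono (Gif.Spec.GifAddExtensionBlock_2.gab2_from_malloc Lay hLay μ hμ u₀ hcode h_store8 H rest frames F R
      len Hc Fc x Hm e ret v w hmid) ?_
    intro z hz
    exact Or.inl hz
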